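-- pv_equiv track=rewrite | github.com/Edison199902222/Leetcode_notes | leetcode/DP/划分类dp/LT45. Maximum Subarray Difference.py | maxDiffSubArrays
-- ===== SOURCE A (Python) =====
-- def maxDiffSubArrays(nums):
--     # write your code here
--     n = len(nums)
--     left_min = [0 for i in range(n)]
--     left_max = [0 for i in range(n)]
--     right_min = [0 for i in range(n)]
--     right_max = [0 for i in range(n)]
--     prefix = 0
--     local_min = 0
--     local_max = 0
--     global_min = float("inf")
--     global_max = float("-inf")
--     for i in range(len(nums)):
--         prefix += nums[i]
--         global_min = min(global_min, prefix - local_max)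
--         global_max = max(global_max, prefix - local_min)
--         local_min = min(local_min, prefix)
--         local_max = max(local_max, prefix)
--         left_min[i] = global_min
--         left_max[i] = global_max
--
--     prefix = 0
--     local_min = 0
--     local_max = 0
--     global_min = float("inf")
--     global_max = float("-inf")
--     for i in range(n - 1, -1, -1):
--         prefix += nums[i]
--         global_min = min(global_min, prefix - local_max)
--         global_max = max(global_max, prefix - local_min)
--         local_min = min(local_min, prefix)
--         local_max = max(local_max, prefix)
--         right_min[i] = global_min
--         right_max[i] = global_max
--     result = 0
--     for i in range(1, n):
--         result = max(result, abs(left_max[i - 1] - right_min[i]), abs(left_min[i - 1] - right_max[i]))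
--     return result
-- ===== SOURCE B (Python) =====
-- def maxDiffSubArrays(nums):
--     n = len(nums)
--     if n < 2:
--         return 0
--
--     def kadane(seq):
--         cur_min = cur_max = best_min = best_max = seq[0]
--         mins = [best_min]
--         maxs = [best_max]
--         for x in seq[1:]:
--             cur_min = min(x, cur_min + x)
--             cur_max = max(x, cur_max + x)
--             best_min = min(best_min, cur_min)
--             best_max = max(best_max, cur_max)
--             mins.append(best_min)
--             maxs.append(best_max)
--         return mins, maxs
--
--     left_min, left_max = kadane(nums)
--     rmins_rev, rmaxs_rev = kadane(nums[::-1])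
--     right_min = rmins_rev[::-1]
--     right_max = rmaxs_rev[::-1]
--     result = 0
--     for i in range(1, n):
--         result = max(result, abs(left_max[i - 1] - right_min[i]), abs(left_min[i - 1] - right_max[i]))
--     return result
-- ===== Notes on version B (the rewrite author's own statement) =====
-- stated objective: alternative
-- what changed: The four running max/min-subarray arrays are computed with classic Kadane recurrences (cur = max(x, cur+x), best = max(best, cur)) seeded from the first element, instead of A's prefix-sum minus running local prefix-extremum trick with float infinity sentinels.
import Mathlib
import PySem

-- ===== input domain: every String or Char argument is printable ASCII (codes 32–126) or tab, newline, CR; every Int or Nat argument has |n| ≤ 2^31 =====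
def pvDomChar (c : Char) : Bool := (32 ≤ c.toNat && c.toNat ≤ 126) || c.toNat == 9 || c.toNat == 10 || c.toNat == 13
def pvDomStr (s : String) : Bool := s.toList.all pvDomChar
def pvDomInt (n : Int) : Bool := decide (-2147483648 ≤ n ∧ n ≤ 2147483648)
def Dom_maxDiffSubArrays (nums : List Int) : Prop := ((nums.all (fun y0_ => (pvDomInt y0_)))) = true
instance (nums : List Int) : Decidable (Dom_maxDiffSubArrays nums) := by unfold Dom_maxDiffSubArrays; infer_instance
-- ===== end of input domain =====

-- B replaces A's prefix-sum/local-extremum trick by classic Kadane recurrences for the four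
-- running max/min-subarray arrays (objective: alternative; same O(n) cost, no speed claim).

-- ===== PORT A =====
-- float("inf")/float("-inf") sentinels are modeled by Option Int (none = not yet set);
-- Python's min(inf, v) = v is pvOptMin none v = v, exact on ints.
def pvOptMin (g : Option Int) (v : Int) : Int := match g with | none => v | some g => min g v
def pvOptMax (g : Option Int) (v : Int) : Int := match g with | none => v | some g => max g v

-- one forward pass of A's loop body over the remaining elements; returns the
-- (global_min, global_max) values written at each index, in processing order
def pvPassA : List Int → Int → Int → Int → Option Int → Option Int → List Int × List Int
  | [], _, _, _, _, _ => ([], [])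
  | x :: rest, pre, lmin, lmax, gmin, gmax =>
    let p := pre + x
    let gmin' := pvOptMin gmin (p - lmax)
    let gmax' := pvOptMax gmax (p - lmin)
    let r := pvPassA rest p (min lmin p) (max lmax p) (some gmin') (some gmax')
    (gmin' :: r.1, gmax' :: r.2)

-- the final loop, shared verbatim by both Pythons: walks left arrays at i-1 and right arrays at i
def pvCombine : Int → List Int → List Int → List Int → List Int → Int
  | res, a :: as', b :: bs, c :: cs, d :: ds =>
    pvCombine (max (max res |b - c|) |a - d|) as' bs cs ds
  | res, _, _, _, _ => res

def maxDiffSubArrays (nums : List Int) : Int :=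
  let L := pvPassA nums 0 0 0 none none
  let R := pvPassA nums.reverse 0 0 0 none none
  pvCombine 0 L.1 L.2 R.1.reverse.tail R.2.reverse.tail

-- ===== PORT B =====
-- Kadane pass over the elements after the first; returns the running best lists
def pvKadane : List Int → Int → Int → Int → Int → List Int × List Int
  | [], _, _, _, _ => ([], [])
  | x :: rest, cmin, cmax, bmin, bmax =>
    let cmin' := min x (cmin + x)
    let cmax' := max x (cmax + x)
    let bmin' := min bmin cmin'
    let bmax' := max bmax cmax'
    let r := pvKadane rest cmin' cmax' bmin' bmax'
    (bmin' :: r.1, bmax' :: r.2)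

def maxDiffSubArrays_alt (nums : List Int) : Int :=
  match nums, nums.reverse with
  | x :: y :: rest, z :: restR =>
    let L := pvKadane (y :: rest) x x x x
    let R := pvKadane restR z z z z
    pvCombine 0 (x :: L.1) (x :: L.2) ((z :: R.1).reverse.tail) ((z :: R.2).reverse.tail)
  | _, _ => 0

-- ===== PRECONDITION & SPEC =====
def Spec_maxDiffSubArrays (nums : List Int) (out : Int) : Prop := out = maxDiffSubArrays_alt nums
instance (nums : List Int) (out : Int) : Decidable (Spec_maxDiffSubArrays nums out) := by unfold Spec_maxDiffSubArrays; infer_instance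

-- ===== CLAIM (what is proved, stated in full; the proofs are below) =====
def Claim_equal_maxDiffSubArrays : Prop := ∀ (nums : List Int), Dom_maxDiffSubArrays nums → Spec_maxDiffSubArrays nums (maxDiffSubArrays nums)

-- ===== LEMMAS AND PROOFS =====

-- Invariant linking A's prefix/local state to Kadane's current/best state:
-- cmax = pre - lp and cmin = pre - Lp, where lp/Lp are the previous local min/max of prefixes.
lemma pvPassA_eq_kadane (rest : List Int) : ∀ (pre lp Lp cmin cmax bmin bmax : Int),
    cmax = pre - lp → cmin = pre - Lp →
    pvPassA rest pre (min lp pre) (max Lp pre) (some bmin) (some bmax)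
      = pvKadane rest cmin cmax bmin bmax := by
  induction rest with
  | nil => intro _ _ _ _ _ _ _ _ _; rfl
  | cons x rest ih =>
    intro pre lp Lp cmin cmax bmin bmax h1 h2
    simp only [pvPassA, pvKadane, pvOptMin, pvOptMax]
    have e1 : pre + x - max Lp pre = min x (cmin + x) := by subst h2; omega
    have e2 : pre + x - min lp pre = max x (cmax + x) := by subst h1; omega
    rw [e1, e2,
      ih (pre + x) (min lp pre) (max Lp pre) (min x (cmin + x)) (max x (cmax + x))
        (min bmin (min x (cmin + x))) (max bmax (max x (cmax + x))) e2.symm e1.symm]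

-- start-up step: running A's pass from the zero state on a nonempty list produces x
-- consed onto the Kadane pass from the all-x state
lemma pvPassA_start (x : Int) (rest : List Int) :
    pvPassA (x :: rest) 0 0 0 none none
      = (x :: (pvKadane rest x x x x).1, x :: (pvKadane rest x x x x).2) := by
  simp only [pvPassA, pvOptMin, pvOptMax, zero_add, sub_zero]
  rw [pvPassA_eq_kadane rest x 0 0 x x x x (by omega) (by omega)]

-- ===== VERDICT (by name: the statement is the Claim_ definition above) =====
theorem maxDiffSubArrays_spec : Claim_equal_maxDiffSubArrays := by
  intro nums _
  unfold Spec_maxDiffSubArrays maxDiffSubArrays maxDiffSubArrays_alt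
  cases nums with
  | nil => rfl
  | cons x t =>
    cases t with
    | nil => rfl
    | cons y rest =>
      obtain ⟨z, restR, hr⟩ := List.exists_cons_of_ne_nil
        (show (x :: y :: rest).reverse ≠ [] by simp)
      rw [hr, pvPassA_start x (y :: rest), pvPassA_start z restR]
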